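-- pv_equiv track=rewrite | github.com/KaranXcode/SU_PA2 | part2/translate_lrl.py | _transliterate_latin
-- ===== SOURCE A (Python) =====
-- _LATIN_DIGRAPHS = [
--     ("sh", "श"), ("ch", "च"), ("th", "थ"), ("ph", "फ"), ("kh", "ख"),
--     ("gh", "घ"), ("ck", "क"), ("ng", "ंग"), ("tion", "शन"),
--     ("ee", "ी"), ("oo", "ू"), ("ai", "ै"), ("ay", "े"), ("ea", "ी"),
--     ("oa", "ो"), ("ou", "ौ"), ("ow", "ौ"), ("oi", "ॉय"), ("oy", "ॉय"),
--     ("au", "ॉ"), ("aw", "ॉ"),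
-- ]
--
-- _LATIN_LETTER = {
--     "a": "ा", "b": "ब", "c": "क", "d": "ड", "e": "े", "f": "फ",
--     "g": "ग", "h": "ह", "i": "ि", "j": "ज", "k": "क", "l": "ल",
--     "m": "म", "n": "न", "o": "ो", "p": "प", "q": "क", "r": "र",
--     "s": "स", "t": "ट", "u": "ु", "v": "व", "w": "व", "x": "क्स",
--     "y": "य", "z": "ज़",
-- }
--
-- _VOWEL_SIGNS = {"ा", "ि", "ी", "ु", "ू", "े", "ै", "ो", "ौ", "ं"}
--
-- def _transliterate_latin(word: str) -> str:
--     """Crude Latin->Devanagari transliteration. Inserts अ where a consonant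
--     would otherwise have no following vowel sign."""
--     w = word.lower()
--     out = []
--     i = 0
--     while i < len(w):
--         # try digraphs first
--         matched = False
--         for n in (4, 3, 2):
--             if i + n <= len(w):
--                 seg = w[i:i + n]
--                 hit = next((p for p in _LATIN_DIGRAPHS if p[0] == seg), None)
--                 if hit:
--                     out.append(hit[1])
--                     i += n
--                     matched = True
--                     break
--         if matched:
--             continue
--         ch = w[i]
--         if ch in _LATIN_LETTER:
--             out.append(_LATIN_LETTER[ch])
--         i += 1
--
--     # post-process: a Devanagari consonant followed by another consonant needs
--     # an explicit virama or schwa. We insert schwa (अ) where a consonant is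
--     # not followed by a vowel sign or another piece producing a vowel sign.
--     fixed = []
--     for j, piece in enumerate(out):
--         fixed.append(piece)
--         if piece and piece[-1] not in _VOWEL_SIGNS and piece not in _VOWEL_SIGNS:
--             nxt = out[j + 1] if j + 1 < len(out) else ""
--             if nxt and nxt[0] in _VOWEL_SIGNS:
--                 continue
--             # else add inherent schwa as consonant marker (just append nothing
--             # -- Devanagari consonant glyphs already imply schwa)
--             continue
--     return "".join(fixed)
-- ===== SOURCE B (Python) =====
-- _LATIN_DIGRAPHS = [
--     ("sh", "श"), ("ch", "च"), ("th", "थ"), ("ph", "फ"), ("kh", "ख"),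
--     ("gh", "घ"), ("ck", "क"), ("ng", "ंग"), ("tion", "शन"),
--     ("ee", "ी"), ("oo", "ू"), ("ai", "ै"), ("ay", "े"), ("ea", "ी"),
--     ("oa", "ो"), ("ou", "ौ"), ("ow", "ौ"), ("oi", "ॉय"), ("oy", "ॉय"),
--     ("au", "ॉ"), ("aw", "ॉ"),
-- ]
--
-- _LATIN_LETTER = {
--     "a": "ा", "b": "ब", "c": "क", "d": "ड", "e": "े", "f": "फ",
--     "g": "ग", "h": "ह", "i": "ि", "j": "ज", "k": "क", "l": "ल",
--     "m": "म", "n": "न", "o": "ो", "p": "प", "q": "क", "r": "र",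
--     "s": "स", "t": "ट", "u": "ु", "v": "व", "w": "व", "x": "क्स",
--     "y": "य", "z": "ज़",
-- }
--
-- # every digraph is 2 chars except "tion"; keep the 2-char ones as a dict ...
-- _PAIR = {k: v for k, v in _LATIN_DIGRAPHS if len(k) == 2}
-- # ... and fold "tion" into the single-key table via a sentinel placed by replace()
-- _ONE = {**_LATIN_LETTER, "\x00": "शन"}
--
-- def _transliterate_latin(word: str) -> str:
--     # "tion" occurrences can never overlap a scanner token, so a global replace
--     # with a sentinel is exact; then a single one-character-lookahead fold.
--     s = word.lower().replace("tion", "\x00")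
--     out = []
--     pending = None
--     for c in s:
--         if pending is not None and pending + c in _PAIR:
--             out.append(_PAIR[pending + c])
--             pending = None
--         else:
--             if pending is not None:
--                 out.append(_ONE.get(pending, ""))
--             pending = c
--     if pending is not None:
--         out.append(_ONE.get(pending, ""))
--     return "".join(out)
-- ===== Notes on version B (the rewrite author's own statement) =====
-- stated objective: faster
-- what changed: Replaces A's index-advancing while-loop (a per-position linear generator scan over the digraph list, plus a dead post-process pass) with two staged passes: one global str.replace of the sole 4-char key 'tion' by a sentinel, then a single one-character-lookahead fold using a 2-char-pair dict and a single-char dict.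
import Mathlib
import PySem

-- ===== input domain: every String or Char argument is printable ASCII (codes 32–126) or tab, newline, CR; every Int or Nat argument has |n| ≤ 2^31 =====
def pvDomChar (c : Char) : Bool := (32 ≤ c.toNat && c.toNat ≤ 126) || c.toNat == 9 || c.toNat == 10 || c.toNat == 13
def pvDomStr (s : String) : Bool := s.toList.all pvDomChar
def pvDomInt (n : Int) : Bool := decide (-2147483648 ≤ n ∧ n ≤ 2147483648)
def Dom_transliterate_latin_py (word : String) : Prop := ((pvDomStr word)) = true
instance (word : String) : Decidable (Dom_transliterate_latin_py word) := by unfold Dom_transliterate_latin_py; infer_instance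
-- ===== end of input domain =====

-- B replaces A's manual index-advancing scanner (plus its dead post-process pass)
-- with two staged passes: a global replace of the one 4-char key "tion" by a
-- sentinel, then a single one-character-lookahead fold over one pair table and
-- one single-char table (in Python: str.replace + a dict-backed fold).


-- ===== PORT A =====
-- _LATIN_DIGRAPHS (values as char lists; strings are ported via List Char)
def pvDigraphs : List (List Char × List Char) := [
  (['s', 'h'], ['श']),
  (['c', 'h'], ['च']),
  (['t', 'h'], ['थ']),
  (['p', 'h'], ['फ']),
  (['k', 'h'], ['ख']),
  (['g', 'h'], ['घ']),
  (['c', 'k'], ['क']),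
  (['n', 'g'], ['ं', 'ग']),
  (['t', 'i', 'o', 'n'], ['श', 'न']),
  (['e', 'e'], ['ी']),
  (['o', 'o'], ['ू']),
  (['a', 'i'], ['ै']),
  (['a', 'y'], ['े']),
  (['e', 'a'], ['ी']),
  (['o', 'a'], ['ो']),
  (['o', 'u'], ['ौ']),
  (['o', 'w'], ['ौ']),
  (['o', 'i'], ['ॉ', 'य']),
  (['o', 'y'], ['ॉ', 'य']),
  (['a', 'u'], ['ॉ']),
  (['a', 'w'], ['ॉ'])]

-- _LATIN_LETTER (a constant dict: association list in insertion order)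
def pvLetters : List (Char × List Char) := [
  ('a', ['ा']),
  ('b', ['ब']),
  ('c', ['क']),
  ('d', ['ड']),
  ('e', ['े']),
  ('f', ['फ']),
  ('g', ['ग']),
  ('h', ['ह']),
  ('i', ['ि']),
  ('j', ['ज']),
  ('k', ['क']),
  ('l', ['ल']),
  ('m', ['म']),
  ('n', ['न']),
  ('o', ['ो']),
  ('p', ['प']),
  ('q', ['क']),
  ('r', ['र']),
  ('s', ['स']),
  ('t', ['ट']),
  ('u', ['ु']),
  ('v', ['व']),
  ('w', ['व']),
  ('x', ['क', '्', 'स']),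
  ('y', ['य']),
  ('z', ['ज', '़'])]

-- the `for n in (4, 3, 2)` digraph attempt at the current position, unrolled;
-- `seg = w[i:i+n]` is `cs.take n` on the remaining suffix `cs`, the guard
-- `i + n <= len(w)` is `n ≤ cs.length`, `next((p for p in … if p[0] == seg), None)`
-- is `find?`
def pvTryDigraph (cs : List Char) : Option (List Char × Nat) :=
  match (if 4 ≤ cs.length then pvDigraphs.find? (fun p => p.1 == cs.take 4) else none) with
  | some p => some (p.2, 4)
  | none =>
    match (if 3 ≤ cs.length then pvDigraphs.find? (fun p => p.1 == cs.take 3) else none) with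
    | some p => some (p.2, 3)
    | none =>
      match (if 2 ≤ cs.length then pvDigraphs.find? (fun p => p.1 == cs.take 2) else none) with
      | some p => some (p.2, 2)
      | none => none

-- the `while i < len(w)` loop; `i += n` / `i += 1` is dropping the consumed
-- prefix of the remaining suffix, `out.append(…)` is `out ++ [_]`
def pvALoop (cs : List Char) (out : List (List Char)) : List (List Char) :=
  match cs with
  | [] => out
  | c :: rest =>
    match pvTryDigraph (c :: rest) with
    -- i += n: n ≥ 2 chars are consumed; written as rest.drop (n - 1)
    -- (= (c :: rest).drop n) so the remaining suffix is structurally shorter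
    | some (v, n) => pvALoop (rest.drop (n - 1)) (out ++ [v])
    | none =>
      match pvLetters.find? (fun p => p.1 == c) with
      | some p => pvALoop rest (out ++ [p.2])
      | none => pvALoop rest out
termination_by cs.length
decreasing_by
  · simp only [List.length_drop, List.length_cons]; omega
  · simp
  · simp

-- the post-process loop: every branch of its body ends in `continue`, so each
-- iteration's only effect is the single `fixed.append(piece)`
def pvPost (out : List (List Char)) : List (List Char) :=
  (PySem.List.enumerate out).foldl (fun fixed jp => fixed ++ [jp.2]) []

def transliterate_latin_py (word : String) : String :=
  String.ofList (PySem.Chars.join [] (pvPost (pvALoop (PySem.Chars.lower word.toList) [])))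

-- ===== PORT B =====
-- _PAIR = {k: v for k, v in _LATIN_DIGRAPHS if len(k) == 2}  (distinct keys, so
-- the dict is exactly the filtered association list)
def pvPairs : List (List Char × List Char) := pvDigraphs.filter (fun p => p.1.length == 2)

-- _ONE = {**_LATIN_LETTER, "\x00": "शन"}  (the new key is fresh: append)
def pvOne : List (Char × List Char) := pvLetters ++ [('\x00', ['श', 'न'])]

-- _ONE.get(c, "")
def pvOneGet (c : Char) : List Char := ((pvOne.find? (fun q => q.1 == c)).map (·.2)).getD []

-- the loop body: state = (out, pending)
def pvBStep (st : List (List Char) × Option Char) (c : Char) : List (List Char) × Option Char :=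
  match st.2 with
  | some p =>
    match pvPairs.find? (fun q => q.1 == [p, c]) with
    | some q => (st.1 ++ [q.2], none)
    | none => (st.1 ++ [pvOneGet p], some c)
  | none => (st.1, some c)

-- the final `if pending is not None: out.append(_ONE.get(pending, ""))`
def pvBFlush (st : List (List Char) × Option Char) : List (List Char) :=
  st.1 ++ (match st.2 with | some p => [pvOneGet p] | none => [])

def transliterate_latin_py_alt (word : String) : String :=
  String.ofList (PySem.Chars.join []
    (pvBFlush ((PySem.Chars.replace (PySem.Chars.lower word.toList)
        ['t', 'i', 'o', 'n'] ['\x00']).foldl pvBStep ([], none))))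

-- ===== PRECONDITION & SPEC =====
def Spec_transliterate_latin_py (word : String) (out : String) : Prop := out = transliterate_latin_py_alt word
instance (word : String) (out : String) : Decidable (Spec_transliterate_latin_py word out) := by unfold Spec_transliterate_latin_py; infer_instance

-- ===== CLAIM (what is proved, stated in full; the proofs are below) =====
def Claim_equal_transliterate_latin_py : Prop := ∀ (word : String), Dom_transliterate_latin_py word → Spec_transliterate_latin_py word (transliterate_latin_py word)

-- ===== LEMMAS AND PROOFS =====

-- "".join over char-list pieces is flatten
theorem pvJoinNil (l : List (List Char)) : PySem.Chars.join [] l = l.flatten := by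
  induction l with
  | nil => rfl
  | cons x t ih =>
    cases t with
    | nil => simp [PySem.Chars.join, List.intercalate, List.intersperse]
    | cons y u =>
      simp only [PySem.Chars.join, List.intercalate] at ih ⊢
      rw [show List.intersperse ([] : List Char) (x :: y :: u)
            = x :: [] :: List.intersperse [] (y :: u) from rfl]
      simp only [List.flatten_cons, List.nil_append]
      rw [ih]
      simp

-- the dead post-process pass returns its input
theorem pvPost_id (out : List (List Char)) : pvPost out = out := by
  unfold pvPost
  rw [show (fun (fixed : List (List Char)) (jp : Int × List Char) => fixed ++ [jp.2])
        = (fun fixed jp => fixed ++ [(fun (x : Int × List Char) => x.2) jp]) from rfl]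
  rw [PySem.List.foldl_append_singleton_eq_map, PySem.List.map_snd_enumerate]
  rfl

-- find? respects a predicate equality that holds on the list's members
theorem pvFind?_congr_mem {α : Type} (l : List α) (p q : α → Bool)
    (h : ∀ x ∈ l, p x = q x) : l.find? p = l.find? q := by
  induction l with
  | nil => rfl
  | cons x t ih =>
    simp only [List.find?_cons]
    rw [h x (List.mem_cons_self ..)]
    cases q x
    · exact ih fun y hy => h y (List.mem_cons_of_mem _ hy)
    · rfl

-- find? is unchanged by restricting to a superset of the matches
theorem pvFind?_restrict {α : Type} (l : List α) (p q : α → Bool)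
    (h : ∀ x, p x = true → q x = true) : l.find? p = (l.filter q).find? p := by
  rw [List.find?_filter]
  apply pvFind?_congr_mem
  intro x _
  cases hp : p x with
  | false => simp
  | true => simp [h x hp]

theorem pvDigraphs_keys : ∀ p ∈ pvDigraphs, p.1.length = 2 ∨ p.1 = ['t', 'i', 'o', 'n'] := by
  decide

theorem pvTryDigraph_tion (cs : List Char) (h : ['t', 'i', 'o', 'n'].isPrefixOf cs) :
    pvTryDigraph cs = some (['श', 'न'], 4) := by
  have hpre := List.isPrefixOf_iff_prefix.mp h
  have hlen : 4 ≤ cs.length := hpre.length_le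
  have htake : ['t', 'i', 'o', 'n'] = cs.take 4 := List.prefix_iff_eq_take.mp hpre
  unfold pvTryDigraph
  rw [if_pos hlen, ← htake]
  rfl

theorem pvTryDigraph_eq_find2 (cs : List Char) (h : ¬ ['t', 'i', 'o', 'n'].isPrefixOf cs) :
    pvTryDigraph cs = (pvPairs.find? (fun p => p.1 == cs.take 2)).map (fun p => (p.2, 2)) := by
  have hnot4 : ¬ (['t', 'i', 'o', 'n'] = cs.take 4) := by
    intro he
    exact h (List.isPrefixOf_iff_prefix.mpr (List.prefix_iff_eq_take.mpr he))
  have h4 : (if 4 ≤ cs.length then pvDigraphs.find? (fun p => p.1 == cs.take 4) else none) = none := by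
    split
    · next hle =>
      apply List.find?_eq_none.mpr
      intro p hp hbeq
      have heq : p.1 = cs.take 4 := by simpa using hbeq
      rcases pvDigraphs_keys p hp with h2 | ht
      · have : (cs.take 4).length = 4 := by simp [List.length_take]; omega
        rw [heq] at h2; omega
      · exact hnot4 (ht ▸ heq)
    · rfl
  have h3 : (if 3 ≤ cs.length then pvDigraphs.find? (fun p => p.1 == cs.take 3) else none) = none := by
    split
    · next hle =>
      apply List.find?_eq_none.mpr
      intro p hp hbeq
      have heq : p.1 = cs.take 3 := by simpa using hbeq
      have hl3 : (cs.take 3).length = 3 := by simp [List.length_take]; omega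
      rcases pvDigraphs_keys p hp with h2 | ht
      · rw [heq] at h2; omega
      · rw [← heq, ht] at hl3; simp at hl3
    · rfl
  have hD2keys : ∀ p ∈ pvPairs, p.1.length = 2 := by decide
  have h2 : (if 2 ≤ cs.length then pvDigraphs.find? (fun p => p.1 == cs.take 2) else none)
      = pvPairs.find? (fun p => p.1 == cs.take 2) := by
    split
    · next hle =>
      exact pvFind?_restrict pvDigraphs _ _ (fun p hbeq => by
        have heq : p.1 = cs.take 2 := by simpa using hbeq
        simp [heq, List.length_take]; omega)
    · next hle =>
      symm
      apply List.find?_eq_none.mpr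
      intro p hp hbeq
      have heq : p.1 = cs.take 2 := by simpa using hbeq
      have := hD2keys p hp
      rw [heq] at this
      simp [List.length_take] at this
      omega
  unfold pvTryDigraph
  rw [h4, h3, h2]
  cases hf : pvPairs.find? (fun p => p.1 == cs.take 2) <;> rfl

-- recursive characterization of s.replace("tion", "\x00")
def pvRepl : List Char → List Char
  | [] => []
  | c :: t =>
    if ['t', 'i', 'o', 'n'].isPrefixOf (c :: t) then '\x00' :: pvRepl (t.drop 3)
    else c :: pvRepl t
termination_by l => l.length
decreasing_by
  · simp only [List.length_drop, List.length_cons]; omega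
  · simp

theorem pvReplGo (fuel : Nat) : ∀ (l acc : List Char), l.length ≤ fuel →
    PySem.Chars.replace.go ['t', 'i', 'o', 'n'] ['\x00'] fuel l acc
      = acc.reverse ++ pvRepl l := by
  induction fuel with
  | zero =>
    intro l acc hlen
    have : l = [] := List.eq_nil_of_length_eq_zero (by omega)
    subst this
    simp [PySem.Chars.replace.go, pvRepl]
  | succ n ih =>
    intro l acc hlen
    cases l with
    | nil => simp [PySem.Chars.replace.go, pvRepl]
    | cons c t =>
      rw [PySem.Chars.replace.go, pvRepl]
      split
      · next hpre =>
        rw [ih _ _ (by simp only [List.length_drop, List.length_cons] at hlen ⊢; omega)]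
        simp [show ((c :: t).drop 4) = t.drop 3 from rfl]
      · next hpre =>
        rw [ih _ _ (by simp only [List.length_cons] at hlen; omega)]
        simp

theorem pvReplace_eq (s : List Char) :
    PySem.Chars.replace s ['t', 'i', 'o', 'n'] ['\x00'] = pvRepl s := by
  rw [PySem.Chars.replace]
  simp only [List.isEmpty_cons, if_false, Bool.false_eq_true]
  exact pvReplGo s.length s [] le_rfl

-- recursive characterization of B's fold (lookahead tokenizer on the replaced list)
def pvGScan : List Char → List (List Char)
  | [] => []
  | [c] => [pvOneGet c]
  | c1 :: c2 :: rest =>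
    match pvPairs.find? (fun q => q.1 == [c1, c2]) with
    | some q => q.2 :: pvGScan rest
    | none => pvOneGet c1 :: pvGScan (c2 :: rest)
termination_by l => l.length
decreasing_by
  · simp
  · simp

theorem pvFold (N : Nat) : ∀ s : List Char, s.length ≤ N →
    (∀ out p, pvBFlush (s.foldl pvBStep (out, some p)) = out ++ pvGScan (p :: s)) ∧
    (∀ out, pvBFlush (s.foldl pvBStep (out, none)) = out ++ pvGScan s) := by
  induction N with
  | zero =>
    intro s hlen
    have : s = [] := List.eq_nil_of_length_eq_zero (by omega)
    subst this
    exact ⟨fun out p => by simp [pvBFlush, pvGScan], fun out => by simp [pvBFlush, pvGScan]⟩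
  | succ N ih =>
    intro s hlen
    cases s with
    | nil =>
      exact ⟨fun out p => by simp [pvBFlush, pvGScan], fun out => by simp [pvBFlush, pvGScan]⟩
    | cons c rest =>
      have hrest : rest.length ≤ N := by simp only [List.length_cons] at hlen; omega
      constructor
      · intro out p
        rw [List.foldl_cons]
        rw [show pvBStep (out, some p) c
              = (match pvPairs.find? (fun q => q.1 == [p, c]) with
                 | some q => (out ++ [q.2], none)
                 | none => (out ++ [pvOneGet p], some c)) from rfl]
        rw [pvGScan]
        cases hf : pvPairs.find? (fun q => q.1 == [p, c]) with
        | some q =>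
          rw [(ih rest hrest).2]
          simp
        | none =>
          rw [(ih rest hrest).1]
          simp
      · intro out
        rw [List.foldl_cons]
        rw [show pvBStep (out, none) c = (out, some c) from rfl]
        exact (ih rest hrest).1 out c

-- facts about the tables
theorem pvPairs_fst_ne_nul : ∀ q ∈ pvPairs, q.1.head? ≠ some '\x00' := by decide

theorem pvPairs_snd_key : ∀ q ∈ pvPairs, q.1.getLast? ≠ some 't' ∧ q.1.getLast? ≠ some '\x00' := by
  decide

theorem pvPairs_find_nul_left (c : Char) :
    pvPairs.find? (fun q => q.1 == ['\x00', c]) = none := by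
  apply List.find?_eq_none.mpr
  intro q hq hbeq
  have heq : q.1 = ['\x00', c] := by simpa using hbeq
  exact pvPairs_fst_ne_nul q hq (by rw [heq]; rfl)

theorem pvPairs_find_nul_right (c : Char) :
    pvPairs.find? (fun q => q.1 == [c, '\x00']) = none := by
  apply List.find?_eq_none.mpr
  intro q hq hbeq
  have heq : q.1 = [c, '\x00'] := by simpa using hbeq
  exact (pvPairs_snd_key q hq).2 (by rw [heq]; rfl)

theorem pvOneGet_nul : pvOneGet '\x00' = ['श', 'न'] := by decide

theorem pvGScan_nul (s : List Char) : pvGScan ('\x00' :: s) = ['श', 'न'] :: pvGScan s := by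
  cases s with
  | nil => simp only [pvGScan]; rw [pvOneGet_nul]
  | cons c t => rw [pvGScan, pvPairs_find_nul_left, pvOneGet_nul]

theorem pvOneGet_of_ne_nul (c : Char) (h : c ≠ '\x00') :
    pvOneGet c = ((pvLetters.find? (fun q => q.1 == c)).map (·.2)).getD [] := by
  unfold pvOneGet pvOne
  rw [List.find?_append]
  cases hf : pvLetters.find? (fun q => q.1 == c) with
  | some q => rfl
  | none =>
    simp only [Option.none_or]
    have hb : ('\x00' == c) = false := beq_eq_false_iff_ne.mpr (Ne.symm h)
    simp [List.find?, hb]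

-- the main correspondence at the level of the flattened output
theorem pvMain (N : Nat) : ∀ cs : List Char, cs.length ≤ N → (∀ c ∈ cs, c ≠ '\x00') →
    ∀ out : List (List Char),
    (pvALoop cs out).flatten = out.flatten ++ (pvGScan (pvRepl cs)).flatten := by
  induction N with
  | zero =>
    intro cs hlen _ out
    have : cs = [] := List.eq_nil_of_length_eq_zero (by omega)
    subst this
    simp [pvALoop, pvRepl, pvGScan]
  | succ N ih =>
    intro cs hlen hnul out
    cases cs with
    | nil => simp [pvALoop, pvRepl, pvGScan]
    | cons c rest =>
      have hnulrest : ∀ x ∈ rest, x ≠ '\x00' := fun x hx => hnul x (List.mem_cons_of_mem _ hx)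
      by_cases htion : List.isPrefixOf ['t', 'i', 'o', 'n'] (c :: rest)
      · rw [pvALoop.eq_def]
        simp only [pvTryDigraph_tion _ htion]
        rw [pvRepl, if_pos htion, pvGScan_nul]
        rw [ih _ (by simp only [List.length_drop, List.length_cons] at hlen ⊢; omega)
              (fun x hx => hnulrest x (List.mem_of_mem_drop hx))]
        simp
      · rw [pvALoop.eq_def]
        simp only [pvTryDigraph_eq_find2 _ htion]
        rw [pvRepl, if_neg htion]
        cases hf : pvPairs.find? (fun p => p.1 == (c :: rest).take 2) with
        | some p =>
          -- a 2-digraph matched: rest = c2 :: rest2, the key is [c, c2]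
          have hmem := List.mem_of_find?_eq_some hf
          have hkey : p.1 = (c :: rest).take 2 := by
            have := List.find?_some hf; simpa using this
          have hl2 : p.1.length = 2 := by
            have : ∀ q ∈ pvPairs, q.1.length = 2 := by decide
            exact this p hmem
          cases rest with
          | nil => rw [hkey] at hl2; simp at hl2
          | cons c2 rest2 =>
            have hkey2 : p.1 = [c, c2] := by simpa using hkey
            have hc2t : c2 ≠ 't' := by
              intro he
              exact (pvPairs_snd_key p hmem).1 (by rw [hkey2, he]; rfl)
            have hnotion2 : ¬ List.isPrefixOf ['t', 'i', 'o', 'n'] (c2 :: rest2) := by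
              intro hp
              have := List.isPrefixOf_iff_prefix.mp hp
              rcases this with ⟨u, hu⟩
              injection hu with h1 _
              exact hc2t h1.symm
            rw [pvRepl, if_neg hnotion2]
            rw [pvGScan]
            rw [show pvPairs.find? (fun q => q.1 == [c, c2])
                  = some p from by rw [← hf]; rfl]
            simp only [Option.map_some]
            rw [show List.drop (2 - 1) (c2 :: rest2) = rest2 from rfl]
            rw [ih _ (by simp only [List.length_cons] at hlen ⊢; omega)
                  (fun x hx => hnulrest x (List.mem_cons_of_mem _ hx))]
            simp
        | none =>
          -- no digraph: single char
          simp only [Option.map_none]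
          have hcnul : c ≠ '\x00' := hnul c (List.mem_cons_self ..)
          have hscan : pvGScan (c :: pvRepl rest) = pvOneGet c :: pvGScan (pvRepl rest) := by
            cases rest with
            | nil => simp only [pvRepl, pvGScan]
            | cons c2 rest2 =>
              rw [pvRepl]
              split
              · next =>
                rw [pvGScan, pvPairs_find_nul_right]
              · next =>
                rw [pvGScan]
                rw [show pvPairs.find? (fun q => q.1 == [c, c2])
                      = none from by rw [← hf]; rfl]
          rw [hscan]
          rw [pvOneGet_of_ne_nul c hcnul]
          cases hq : pvLetters.find? (fun p => p.1 == c) with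
          | some q =>
            simp only []
            rw [ih _ (by simp only [List.length_cons] at hlen; omega) hnulrest]
            simp
          | none =>
            simp only []
            rw [ih _ (by simp only [List.length_cons] at hlen; omega) hnulrest]
            simp

-- Dom chars are never the sentinel, also after lower()
theorem pvLower_ne_nul (word : String) (h : Dom_transliterate_latin_py word) :
    ∀ c ∈ PySem.Chars.lower word.toList, c ≠ '\x00' := by
  intro c hc
  rw [PySem.Chars.lower, List.mem_map] at hc
  obtain ⟨d, hd, hld⟩ := hc
  have hdom : pvDomChar d = true := by
    have := (List.all_eq_true.mp h) d hd
    simpa using this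
  have hdn : 9 ≤ d.toNat ∧ d.toNat ≤ 126 := by
    unfold pvDomChar at hdom
    simp only [Bool.or_eq_true, Bool.and_eq_true, decide_eq_true_eq, beq_iff_eq] at hdom
    omega
  intro he
  have hz : c.toNat = 0 := by rw [he]; rfl
  rw [← hld] at hz
  unfold PySem.Chars.lowerChar at hz
  split at hz
  · rw [Char.toNat_ofNat, if_pos (Or.inl (by omega))] at hz
    omega
  · omega

-- ===== VERDICT (by name: the statement is the Claim_ definition above) =====
theorem transliterate_latin_py_spec : Claim_equal_transliterate_latin_py := by
  intro word hdom
  unfold Spec_transliterate_latin_py transliterate_latin_py transliterate_latin_py_alt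
  rw [pvPost_id, pvJoinNil, pvJoinNil, pvReplace_eq]
  rw [(pvFold (pvRepl (PySem.Chars.lower word.toList)).length _ le_rfl).2 []]
  rw [pvMain (PySem.Chars.lower word.toList).length _ le_rfl (pvLower_ne_nul word hdom) []]
  simp
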